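-- pv_equiv track=rewrite | github.com/crhystianmol/ayed-2019-1 | laboratorios/1-recursion/C/problem.py | has_more_vowels
-- ===== SOURCE A (Python) =====
-- def has_more_vowels(s,vocales):
--     numvoc=0
--
--     for i in s:
--         for k in vocales:
--             if str.lower(k)==str.lower(i):
--                 numvoc+=1
--
--     if numvoc > len(s)-numvoc:
--         return True
--     else:
--         return False
-- ===== SOURCE B (Python) =====
-- def has_more_vowels(s, vocales):
--     # Transposed traversal: tabulate the lowered characters of s once,
--     # then iterate over vocales, summing each vowel's frequency in s.
--     freq = {}
--     for ch in s:
--         cl = ch.lower()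
--         freq[cl] = freq.get(cl, 0) + 1
--     numvoc = sum(freq.get(k.lower(), 0) for k in vocales)
--     return 2 * numvoc > len(s)
-- ===== Notes on version B (the rewrite author's own statement) =====
-- stated objective: faster
-- what changed: Transposes the traversal: instead of scanning vocales for every character of s, B tabulates the frequencies of the lowered characters of s once and then makes a single pass over vocales summing each vowel's frequency, with the closing test rewritten as 2*numvoc > len(s).
import Mathlib
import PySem

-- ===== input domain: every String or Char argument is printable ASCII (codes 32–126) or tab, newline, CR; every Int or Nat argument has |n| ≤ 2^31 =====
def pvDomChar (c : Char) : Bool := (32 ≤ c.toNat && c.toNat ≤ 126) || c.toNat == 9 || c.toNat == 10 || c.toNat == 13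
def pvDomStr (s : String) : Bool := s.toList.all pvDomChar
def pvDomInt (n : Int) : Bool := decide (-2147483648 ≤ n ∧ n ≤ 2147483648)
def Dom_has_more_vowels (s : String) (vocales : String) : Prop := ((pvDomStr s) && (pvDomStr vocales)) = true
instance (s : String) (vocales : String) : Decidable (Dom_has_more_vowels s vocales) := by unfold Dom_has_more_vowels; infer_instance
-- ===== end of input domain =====

-- B transposes the traversal: it tabulates the frequencies of the lowered characters of s once and then sums each vowel's frequency over one pass of vocales (faster: two linear passes instead of a nested scan).

-- ===== PORT A =====
def has_more_vowels (s : String) (vocales : String) : Bool :=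
  let numvoc : Int := s.toList.foldl
    (fun n i => vocales.toList.foldl
      (fun n k => if PySem.Chars.lowerChar k = PySem.Chars.lowerChar i then n + 1 else n) n) 0
  if numvoc > (s.toList.length : Int) - numvoc then true else false

-- ===== PORT B =====
def has_more_vowels_alt (s : String) (vocales : String) : Bool :=
  let freq : PySem.Dict Char Int := s.toList.foldl
    (fun d ch => d.modify (PySem.Chars.lowerChar ch) 0 (· + 1)) PySem.Dict.empty
  let numvoc : Int := (vocales.toList.map (fun k => freq.getD (PySem.Chars.lowerChar k) 0)).sum
  decide (2 * numvoc > (s.toList.length : Int))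

-- ===== PRECONDITION & SPEC =====
def Spec_has_more_vowels (s : String) (vocales : String) (out : Bool) : Prop := out = has_more_vowels_alt s vocales
instance (s : String) (vocales : String) (out : Bool) : Decidable (Spec_has_more_vowels s vocales out) := by unfold Spec_has_more_vowels; infer_instance

-- ===== CLAIM =====
def Claim_equal_has_more_vowels : Prop := ∀ (s : String) (vocales : String), Dom_has_more_vowels s vocales → Spec_has_more_vowels s vocales (has_more_vowels s vocales)

-- ===== LEMMAS AND PROOFS =====

-- A's inner loop over vocales adds the number of occurrences of (lowerChar i) in the lowered vocales list
theorem innerA_eq_count (vs : List Char) (i : Char) (n : Int) :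
    vs.foldl (fun n k => if PySem.Chars.lowerChar k = PySem.Chars.lowerChar i then n + 1 else n) n
      = n + ((vs.map PySem.Chars.lowerChar).count (PySem.Chars.lowerChar i) : Int) := by
  induction vs generalizing n with
  | nil => simp
  | cons k vs ih =>
    simp only [List.foldl_cons, List.map_cons, List.count_cons]
    rw [ih]
    by_cases h : PySem.Chars.lowerChar k = PySem.Chars.lowerChar i
    · simp [h]; ring
    · simp [h]

-- splitting a sum of pointwise additions
theorem sum_map_add (l : List Char) (f g : Char → Nat) :
    (l.map (fun b => f b + g b)).sum = (l.map f).sum + (l.map g).sum := by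
  induction l with
  | nil => simp
  | cons c l ih => simp only [List.map_cons, List.sum_cons, ih]; omega

-- indicator sum equals count
theorem sum_indicator_eq_count (lv : List Char) (a : Char) :
    (lv.map (fun b => if (a == b) = true then (1 : Nat) else 0)).sum = lv.count a := by
  induction lv with
  | nil => simp
  | cons c lv ih =>
    simp only [List.map_cons, List.sum_cons, List.count_cons, ih]
    by_cases h : a = c
    · simp [h]; omega
    · have h' : ¬ (c = a) := fun h2 => h h2.symm
      simp [h, h']

-- double counting: summing, over ls, counts in lv equals summing, over lv, counts in ls
theorem double_count (ls lv : List Char) :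
    (ls.map (fun a => lv.count a)).sum = (lv.map (fun b => ls.count b)).sum := by
  induction ls with
  | nil => simp
  | cons a ls ih =>
    simp only [List.map_cons, List.sum_cons, ih, List.count_cons]
    rw [sum_map_add, sum_indicator_eq_count]
    omega

-- B's table lookup is a count in the lowered s
theorem freqD_eq_count (ss : List Char) (c : Char) :
    (ss.foldl (fun d ch => d.modify (PySem.Chars.lowerChar ch) 0 (· + 1))
      (PySem.Dict.empty : PySem.Dict Char Int)).getD c 0
      = ((ss.map PySem.Chars.lowerChar).count c : Int) := by
  have h : ss.foldl (fun d ch => d.modify (PySem.Chars.lowerChar ch) 0 (· + 1))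
      (PySem.Dict.empty : PySem.Dict Char Int)
      = PySem.Dict.counter (ss.map PySem.Chars.lowerChar) := by
    rw [PySem.Dict.counter_eq_foldl, List.foldl_map]
  rw [h, PySem.Dict.getD_counter]

-- A's double loop computes (as an Int) the pair count, grouped by characters of s
theorem numvocA_eq (ss vs : List Char) :
    ss.foldl (fun n i => vs.foldl
      (fun n k => if PySem.Chars.lowerChar k = PySem.Chars.lowerChar i then n + 1 else n) n) 0
    = ((ss.map (fun i => (vs.map PySem.Chars.lowerChar).count (PySem.Chars.lowerChar i))).sum : Int) := by
  have : ∀ n, ss.foldl (fun n i => vs.foldl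
      (fun n k => if PySem.Chars.lowerChar k = PySem.Chars.lowerChar i then n + 1 else n) n) n
    = n + ((ss.map (fun i => (vs.map PySem.Chars.lowerChar).count (PySem.Chars.lowerChar i))).sum : Int) := by
    induction ss with
    | nil => intro n; simp
    | cons i ss ih =>
      intro n
      simp only [List.foldl_cons, List.map_cons, List.sum_cons]
      rw [innerA_eq_count, ih]
      push_cast
      ring
  simpa using this 0

-- ===== VERDICT =====
theorem has_more_vowels_spec : Claim_equal_has_more_vowels := by
  intro s vocales _
  unfold Spec_has_more_vowels has_more_vowels has_more_vowels_alt
  simp only []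
  rw [numvocA_eq]
  have hB : (vocales.toList.map (fun k =>
      (s.toList.foldl (fun d ch => d.modify (PySem.Chars.lowerChar ch) 0 (· + 1))
        (PySem.Dict.empty : PySem.Dict Char Int)).getD (PySem.Chars.lowerChar k) 0)).sum
      = ((vocales.toList.map (fun k =>
          (s.toList.map PySem.Chars.lowerChar).count (PySem.Chars.lowerChar k))).sum : Int) := by
    rw [List.map_congr_left (fun k _ => freqD_eq_count s.toList (PySem.Chars.lowerChar k))]
    induction vocales.toList with
    | nil => simp
    | cons k l ih => simp only [List.map_cons, List.sum_cons, ih]; push_cast; ring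
  rw [hB]
  have hd : ((s.toList.map (fun i =>
      (vocales.toList.map PySem.Chars.lowerChar).count (PySem.Chars.lowerChar i))).sum : Nat)
      = (vocales.toList.map (fun k =>
          (s.toList.map PySem.Chars.lowerChar).count (PySem.Chars.lowerChar k))).sum := by
    have := double_count (s.toList.map PySem.Chars.lowerChar) (vocales.toList.map PySem.Chars.lowerChar)
    simpa [List.map_map, Function.comp] using this
  rw [← hd]
  set m : Nat := (s.toList.map (fun i =>
      (vocales.toList.map PySem.Chars.lowerChar).count (PySem.Chars.lowerChar i))).sum
  by_cases h : 2 * (m : Int) > (s.toList.length : Int)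
  · have h2 : (m : Int) > (s.toList.length : Int) - m := by omega
    simp only [h2, if_true]
    symm
    simpa [String.length_toList] using h
  · have h2 : ¬ (m : Int) > (s.toList.length : Int) - m := by omega
    simp only [h2, if_false]
    symm
    simpa [String.length_toList] using h
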